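-- pv_equiv track=rewrite | github.com/Val-Potitova/discrete-math | Guseynov/graph.py | reflex
-- ===== SOURCE A (Python) =====
-- def reflex(ex_top, ex_edge):
--     ref_top = []
--     c = 0
--     for i in ex_top:
--         ref_top.append([i, i])
--     for i in ref_top:
--         if i in ex_edge:
--             c += 1
--
--     if c == len(ex_top):
--         return "Рефлексивно"
--     elif c == 0:
--         return "Антирефлексивно"
--     return "Нерефлексивно"
-- ===== SOURCE B (Python) =====
-- def reflex(ex_top, ex_edge):
--     if all([i, i] in ex_edge for i in ex_top):
--         return "Рефлексивно"
--     if all([i, i] not in ex_edge for i in ex_top):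
--         return "Антирефлексивно"
--     return "Нерефлексивно"
-- ===== Notes on version B (the rewrite author's own statement) =====
-- stated objective: simpler
-- what changed: Replaces the list-building pass plus the counter loop and count comparisons with two short-circuiting all() quantifiers over the vertices (no ref_top list, no counter).
import Mathlib
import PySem

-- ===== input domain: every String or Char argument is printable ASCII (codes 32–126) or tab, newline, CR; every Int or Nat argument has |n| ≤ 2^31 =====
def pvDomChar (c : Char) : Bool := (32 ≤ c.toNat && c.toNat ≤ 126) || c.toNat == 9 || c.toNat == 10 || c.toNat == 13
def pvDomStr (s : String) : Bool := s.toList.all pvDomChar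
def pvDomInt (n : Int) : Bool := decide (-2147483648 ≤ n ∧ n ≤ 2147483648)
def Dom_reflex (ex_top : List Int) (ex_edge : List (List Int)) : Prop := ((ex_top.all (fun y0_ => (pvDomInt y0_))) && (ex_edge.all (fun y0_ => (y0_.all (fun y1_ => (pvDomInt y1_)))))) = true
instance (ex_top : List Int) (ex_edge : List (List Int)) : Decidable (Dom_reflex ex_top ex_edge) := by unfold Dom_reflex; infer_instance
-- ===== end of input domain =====

-- B replaces A's list-building pass plus counter loop with two short-circuiting
-- quantifiers over the vertices (simpler; same asymptotic cost).

-- ===== PORT A =====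
def reflex (ex_top : List Int) (ex_edge : List (List Int)) : String :=
  -- ref_top = [[i, i] for i in ex_top] built by append, as in A
  let ref_top : List (List Int) := ex_top.foldl (fun acc i => acc ++ [[i, i]]) []
  -- c counts members of ref_top present in ex_edge
  let c : Int := ref_top.foldl (fun c i => if ex_edge.contains i then c + 1 else c) 0
  if c = (ex_top.length : Int) then "Рефлексивно"
  else if c = 0 then "Антирефлексивно"
  else "Нерефлексивно"

-- ===== PORT B =====
def reflex_alt (ex_top : List Int) (ex_edge : List (List Int)) : String :=
  if ex_top.all (fun i => ex_edge.contains [i, i]) then "Рефлексивно"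
  else if ex_top.all (fun i => !ex_edge.contains [i, i]) then "Антирефлексивно"
  else "Нерефлексивно"

-- ===== PRECONDITION & SPEC =====
def Spec_reflex (ex_top : List Int) (ex_edge : List (List Int)) (out : String) : Prop := out = reflex_alt ex_top ex_edge
instance (ex_top : List Int) (ex_edge : List (List Int)) (out : String) : Decidable (Spec_reflex ex_top ex_edge out) := by unfold Spec_reflex; infer_instance

-- ===== CLAIM (what is proved, stated in full; the proofs are below) =====
def Claim_equal_reflex : Prop := ∀ (ex_top : List Int) (ex_edge : List (List Int)), Dom_reflex ex_top ex_edge → Spec_reflex ex_top ex_edge (reflex ex_top ex_edge)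

-- ===== LEMMAS AND PROOFS =====

-- A's counter over a list equals countP (as an Int)
theorem reflex_count_eq (p : List Int → Bool) (l : List (List Int)) (a : Int) :
    l.foldl (fun c i => if p i then c + 1 else c) a = a + (l.countP p : Int) := by
  induction l generalizing a with
  | nil => simp
  | cons x xs ih =>
    simp only [List.foldl_cons, List.countP_cons, ih]
    by_cases h : p x = true <;> simp [h] <;> ring_nf

theorem reflex_spec_aux (ex_top : List Int) (ex_edge : List (List Int)) :
    reflex ex_top ex_edge = reflex_alt ex_top ex_edge := by
  unfold reflex reflex_alt
  simp only [PySem.List.foldl_append_singleton_eq_map, List.nil_append, reflex_count_eq,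
    zero_add, List.countP_map, Function.comp_def]
  set p : Int → Bool := fun i => ex_edge.contains [i, i] with hp
  by_cases hall : ex_top.all p = true
  · have : ex_top.countP p = ex_top.length := by
      rw [List.countP_eq_length]
      intro a ha; exact (List.all_eq_true.mp hall) a ha
    simp [hall, this]
  · have hne : ex_top.countP p ≠ ex_top.length := by
      intro h
      exact hall (List.all_eq_true.mpr (List.countP_eq_length.mp h))
    have h1 : ¬ ((ex_top.countP p : Int) = (ex_top.length : Int)) := by
      exact_mod_cast hne
    by_cases hz : ex_top.countP p = 0
    · have hnone : ex_top.all (fun i => !p i) = true := by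
        rw [List.all_eq_true]
        intro a ha
        have := List.countP_eq_zero.mp hz a ha
        simp [this]
      have h0 : ¬ ((0:ℤ) = (ex_top.length:ℤ)) := by simpa [hz] using h1
      have hnone' : (ex_top.all fun i => !ex_edge.contains [i, i]) = true := hnone
      simp only [hz, Nat.cast_zero]
      rw [if_neg h0, if_neg hall, if_pos hnone']
      simp
    · have h2 : ¬ ((ex_top.countP p : Int) = 0) := by exact_mod_cast hz
      have hnone : ¬ (ex_top.all (fun i => !p i) = true) := by
        intro h
        apply hz
        rw [List.countP_eq_zero]
        intro a ha
        have := (List.all_eq_true.mp h) a ha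
        simpa using this
      have hnone' : ¬ ((ex_top.all fun i => !ex_edge.contains [i, i]) = true) := hnone
      rw [if_neg h1, if_neg h2, if_neg hall, if_neg hnone']

-- ===== VERDICT (by name: the statement is the Claim_ definition above) =====
theorem reflex_spec : Claim_equal_reflex := by
  intro ex_top ex_edge _
  exact reflex_spec_aux ex_top ex_edge
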